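-- pv_equiv track=rewrite | github.com/uds-se/fuzzingbook | notebooks/bookutils/export_notebook_code.py | prefix_code
-- ===== SOURCE A (Python) =====
-- def is_triple_quote(s: str) -> bool:
--     return s == '"""' or s == "'''"
--
-- def prefix_code(code: str, prefix: str) -> str:
--     out = prefix
--     quote = ''
--
--     for i, c in enumerate(code):
--         if c == '\n' and not quote:  # do not indent quotes
--             out += '\n' + prefix
--         else:
--             out += c
--
--         if i < len(code) - 3:
--             next_three = str(code[i:i+3])
--             if not quote and is_triple_quote(next_three):
--                 quote = next_three  # start of quote
--             elif next_three == quote: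
--                 quote = ''  # end of quote
--
--     return out
-- ===== SOURCE B (Python) =====
-- def is_triple_quote(s: str) -> bool:
--     return s == '"""' or s == "'''"
--
-- def prefix_code(code: str, prefix: str) -> str:
--     # Rebuild line by line: split once on '\n', track whether we are inside a
--     # triple-quoted string across lines, and indent only lines outside quotes.
--     lines = code.split('\n')
--     parts = [prefix + lines[0]]
--     quote = ''
--     for prev, cur in zip(lines, lines[1:]):
--         for j in range(len(prev) - 2):
--             t = prev[j:j + 3]
--             if not quote and is_triple_quote(t):
--                 quote = t
--             elif t == quote:
--                 quote = ''
--         parts.append('\n' + (prefix if not quote else '') + cur)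
--     return ''.join(parts)
-- ===== Notes on version B (the rewrite author's own statement) =====
-- stated objective: faster
-- what changed: B splits the input once on '\n' and rebuilds the output line by line with join, carrying a triple-quote state between lines and scanning only full in-line triplets, instead of A's char-by-char loop that appends to one growing string and takes a fresh 3-char slice of the whole code at every index.
import Mathlib
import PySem

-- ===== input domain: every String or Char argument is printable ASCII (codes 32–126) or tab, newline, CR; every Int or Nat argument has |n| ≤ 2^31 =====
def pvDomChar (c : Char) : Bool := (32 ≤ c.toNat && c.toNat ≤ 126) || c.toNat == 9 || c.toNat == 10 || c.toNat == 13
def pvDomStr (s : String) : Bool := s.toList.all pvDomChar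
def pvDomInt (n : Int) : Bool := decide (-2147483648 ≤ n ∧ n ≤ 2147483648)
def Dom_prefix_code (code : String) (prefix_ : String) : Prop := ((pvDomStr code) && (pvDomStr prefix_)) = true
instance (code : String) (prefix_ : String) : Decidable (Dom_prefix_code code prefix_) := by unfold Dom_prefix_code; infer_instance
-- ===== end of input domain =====

-- B rebuilds the output line by line from a single split on '\n', carrying the
-- triple-quote state between lines, instead of A's char-by-char loop; objective: faster (measured).

def pvIsTriple (t : List Char) : Bool := t = ['"', '"', '"'] || t = ['\'', '\'', '\'']

-- ===== PORT A =====
-- the for-loop over enumerate(code): state (out, quote), index i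
def pvALoop (cs : List Char) (n : Nat) (pfx : List Char) :
    List Char → Nat → List Char → List Char → List Char
  | [], _, out, _ => out
  | c :: rest, i, out, quote =>
      let out' := if c = '\n' ∧ quote = [] then out ++ '\n' :: pfx else out ++ [c]
      -- Python `i < len(code) - 3` (ints) is `i + 3 < n`; `code[i:i+3]` is take 3 of drop i
      let quote' := if i + 3 < n then
          (let t := (cs.drop i).take 3
           if quote = [] ∧ pvIsTriple t = true then t
           else if t = quote then [] else quote)
        else quote
      pvALoop cs n pfx rest (i + 1) out' quote'

def prefix_code (code : String) (prefix_ : String) : String :=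
  String.ofList (pvALoop code.toList code.toList.length prefix_.toList
    code.toList 0 prefix_.toList [])

-- ===== PORT B =====
-- inner loop `for j in range(len(prev) - 2)` of Source B
def pvBToggle (line : List Char) (q0 : List Char) : List Char :=
  (List.range (line.length - 2)).foldl (fun q j =>
    let t := (line.drop j).take 3
    if q = [] ∧ pvIsTriple t = true then t
    else if t = q then [] else q) q0

-- outer loop `for prev, cur in zip(lines, lines[1:])` of Source B; state (quote, parts)
def pvBLoop (pfx : List Char) (pairs : List (List Char × List Char))
    (init : List Char × List (List Char)) : List Char × List (List Char) :=
  pairs.foldl (fun st pc =>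
    let q' := pvBToggle pc.1 st.1
    (q', st.2 ++ ['\n' :: ((if q' = [] then pfx else []) ++ pc.2)])) init

def prefix_code_alt (code : String) (prefix_ : String) : String :=
  let cs := code.toList
  let lines := cs.splitOn '\n'   -- code.split('\n'): List.splitOn matches Python split on a 1-char sep
  let pfx := prefix_.toList
  let fin := pvBLoop pfx (lines.zip lines.tail) ([], [pfx ++ lines.headI])
  String.ofList fin.2.flatten      -- ''.join(parts)

-- ===== PRECONDITION & SPEC =====
def Spec_prefix_code (code : String) (prefix_ : String) (out : String) : Prop := out = prefix_code_alt code prefix_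
instance (code : String) (prefix_ : String) (out : String) : Decidable (Spec_prefix_code code prefix_ out) := by unfold Spec_prefix_code; infer_instance

-- ===== CLAIM (what is proved, stated in full; the proofs are below) =====
def Claim_equal_prefix_code : Prop := ∀ (code : String) (prefix_ : String), Dom_prefix_code code prefix_ → Spec_prefix_code code prefix_ (prefix_code code prefix_)

-- ===== LEMMAS AND PROOFS =====

-- one quote-state update on the 3-char window t
def pvStep (q t : List Char) : List Char :=
  if q = [] ∧ pvIsTriple t = true then t else if t = q then [] else q

def pvQStep (n i : Nat) (s q : List Char) : List Char :=
  if i + 3 < n then pvStep q (s.take 3) else q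

-- A's loop with the slice taken from the remaining suffix itself
def pvALoc (n : Nat) (pfx : List Char) : List Char → Nat → List Char → List Char → List Char
  | [], _, out, _ => out
  | c :: rest, i, out, q =>
      pvALoc n pfx rest (i + 1)
        (if c = '\n' ∧ q = [] then out ++ '\n' :: pfx else out ++ [c])
        (pvQStep n i (c :: rest) q)

-- the quote evolution over the chars of L, windows drawn from L ++ rest
def pvQScan (n : Nat) (rest : List Char) : List Char → Nat → List Char → List Char
  | [], _, q => q
  | c :: tl, i, q => pvQScan n rest tl (i + 1) (pvQStep n i (c :: (tl ++ rest)) q)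

-- recursive form of pvBToggle
def pvBTogRec : List Char → List Char → List Char
  | [], q => q
  | [_], q => q
  | [_, _], q => q
  | c :: c2 :: c3 :: tl, q => pvBTogRec (c2 :: c3 :: tl) (pvStep q [c, c2, c3])

def pvQInv (q : List Char) : Prop :=
  q = [] ∨ q = ['"', '"', '"'] ∨ q = ['\'', '\'', '\'']

-- recursive form of B's outer loop, returning the concatenation of the appended parts
def pvBRec (pfx : List Char) : List (List Char) → List Char → List Char
  | [], _ => []
  | [_], _ => []
  | L :: l2 :: ls, q =>
      ('\n' :: ((if pvBToggle L q = [] then pfx else []) ++ l2)) ++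
        pvBRec pfx (l2 :: ls) (pvBToggle L q)

lemma pvStep_inv (q t : List Char) (h : pvQInv q) : pvQInv (pvStep q t) := by
  unfold pvStep
  split_ifs with h1 h2
  · rcases h1 with ⟨-, h1⟩
    simp only [pvIsTriple, Bool.or_eq_true, decide_eq_true_eq] at h1
    unfold pvQInv; tauto
  · left; rfl
  · exact h

lemma pvStep_newline (q t : List Char) (hq : pvQInv q) (ht : '\n' ∈ t) : pvStep q t = q := by
  unfold pvStep
  split_ifs with h1 h2
  · exfalso
    rcases h1 with ⟨-, h1⟩
    simp only [pvIsTriple, Bool.or_eq_true, decide_eq_true_eq] at h1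
    rcases h1 with h1 | h1 <;> subst h1 <;> simp at ht
  · exfalso
    subst h2
    rcases hq with h | h | h <;> subst h <;> simp at ht
  · rfl

lemma pvQStep_newline (n i : Nat) (s q : List Char) (hq : pvQInv q) (ht : '\n' ∈ s.take 3) :
    pvQStep n i s q = q := by
  unfold pvQStep; split_ifs
  · exact pvStep_newline _ _ hq ht
  · rfl

-- L1: pvALoop equals pvALoc on the suffix it walks
lemma pvALoop_eq_loc (cs : List Char) (n : Nat) (pfx : List Char) :
    ∀ (s : List Char) (i : Nat) (out q : List Char), cs.drop i = s →
      pvALoop cs n pfx s i out q = pvALoc n pfx s i out q := by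
  intro s
  induction s with
  | nil => intro i out q _; rfl
  | cons c rest ih =>
      intro i out q h
      have hdrop : cs.drop (i + 1) = rest := by
        have : cs.drop (i + 1) = (cs.drop i).drop 1 := by
          rw [List.drop_drop]
        rw [this, h]; rfl
      show pvALoop cs n pfx (c :: rest) i out q = pvALoc n pfx (c :: rest) i out q
      rw [pvALoop, pvALoc, ih _ _ _ hdrop, h]
      rfl

-- L2: the range-foldl pvBToggle is the structural recursion pvBTogRec
lemma pvBToggle_eq_rec :
    ∀ (line : List Char) (q : List Char), pvBToggle line q = pvBTogRec line q := by
  intro line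
  induction line with
  | nil => intro q; rfl
  | cons c tl ih =>
      intro q
      match tl with
      | [] => rfl
      | [c2] => rfl
      | c2 :: c3 :: tl' =>
          show pvBToggle (c :: c2 :: c3 :: tl') q = _
          unfold pvBToggle
          have hlen : (c :: c2 :: c3 :: tl').length - 2 = (c2 :: c3 :: tl').length - 2 + 1 := by
            simp
          rw [hlen, List.range_succ_eq_map, List.foldl_cons, List.foldl_map]
          have hbody :
              (fun (q : List Char) (j : Nat) =>
                let t := ((c :: c2 :: c3 :: tl').drop (j + 1)).take 3
                if q = [] ∧ pvIsTriple t = true then t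
                else if t = q then [] else q)
              = (fun (q : List Char) (j : Nat) =>
                let t := ((c2 :: c3 :: tl').drop j).take 3
                if q = [] ∧ pvIsTriple t = true then t
                else if t = q then [] else q) := by
            funext q j; rfl
          rw [hbody]
          have hrec : pvBTogRec (c :: c2 :: c3 :: tl') q
              = pvBTogRec (c2 :: c3 :: tl') (pvStep q [c, c2, c3]) := rfl
          rw [hrec]
          have := ih (pvStep q [c, c2, c3])
          unfold pvBToggle at this
          exact this

-- L3: over a '\n'-free line ending before index n, the quote scan is pvBTogRec
lemma pvQScan_eq_togRec (n : Nat) (rest : List Char) :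
    ∀ (L : List Char) (i : Nat) (q : List Char), '\n' ∉ L → pvQInv q → i + L.length < n →
      pvQScan n ('\n' :: rest) L i q = pvBTogRec L q := by
  intro L
  induction L with
  | nil => intro i q _ _ _; rfl
  | cons c tl ih =>
      intro i q hnl hq hb
      have hc : '\n' ∉ tl := fun h => hnl (List.mem_cons_of_mem _ h)
      match tl with
      | [] =>
          have h1 : pvQStep n i (c :: ([] ++ '\n' :: rest)) q = q :=
            pvQStep_newline _ _ _ _ hq (by simp [List.take])
          show pvQScan n ('\n' :: rest) [] (i + 1)
              (pvQStep n i (c :: ([] ++ '\n' :: rest)) q) = pvBTogRec [c] q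
          rw [h1]; rfl
      | [c2] =>
          have h1 : pvQStep n i (c :: ([c2] ++ '\n' :: rest)) q = q :=
            pvQStep_newline _ _ _ _ hq (by simp [List.take])
          have h2 : pvQStep n (i + 1) (c2 :: ([] ++ '\n' :: rest)) q = q :=
            pvQStep_newline _ _ _ _ hq (by simp [List.take])
          show pvQScan n ('\n' :: rest) [c2] (i + 1)
              (pvQStep n i (c :: ([c2] ++ '\n' :: rest)) q) = pvBTogRec [c, c2] q
          rw [h1]
          show pvQScan n ('\n' :: rest) [] (i + 1 + 1)
              (pvQStep n (i + 1) (c2 :: ([] ++ '\n' :: rest)) q) = pvBTogRec [c, c2] q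
          rw [h2]; rfl
      | c2 :: c3 :: tl' =>
          show pvQScan n ('\n' :: rest) (c2 :: c3 :: tl') (i + 1)
              (pvQStep n i (c :: ((c2 :: c3 :: tl') ++ '\n' :: rest)) q) = _
          have hguard : i + 3 < n := by
            simp only [List.length_cons] at hb; omega
          have hwin : pvQStep n i (c :: ((c2 :: c3 :: tl') ++ '\n' :: rest)) q
              = pvStep q [c, c2, c3] := by
            unfold pvQStep
            rw [if_pos hguard]
            rfl
          rw [hwin, pvBTogRec]
          have hb' : (i + 1) + (c2 :: c3 :: tl').length < n := by
            simp only [List.length_cons] at hb ⊢; omega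
          exact ih (i + 1) _ hc (pvStep_inv _ _ hq) hb'

-- L4: pvALoc walks a '\n'-free prefix L emitting it verbatim
lemma pvALoc_append (n : Nat) (pfx : List Char) :
    ∀ (L rest : List Char) (i : Nat) (out q : List Char), '\n' ∉ L →
      pvALoc n pfx (L ++ rest) i out q
        = pvALoc n pfx rest (i + L.length) (out ++ L) (pvQScan n rest L i q) := by
  intro L
  induction L with
  | nil => intro rest i out q _; simp [pvQScan]
  | cons c tl ih =>
      intro rest i out q hnl
      have hc : c ≠ '\n' := fun h => hnl (h ▸ List.mem_cons_self)
      have htl : '\n' ∉ tl := fun h => hnl (List.mem_cons_of_mem _ h)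
      show pvALoc n pfx (c :: (tl ++ rest)) i out q = _
      rw [pvALoc]
      have hout : (if c = '\n' ∧ q = [] then out ++ '\n' :: pfx else out ++ [c]) = out ++ [c] := by
        rw [if_neg]; rintro ⟨h, -⟩; exact hc h
      rw [hout, ih _ _ _ _ htl]
      have h1 : i + 1 + tl.length = i + (c :: tl).length := by simp; omega
      have h2 : (out ++ [c]) ++ tl = out ++ (c :: tl) := by simp
      rw [h1, h2]
      rfl

-- L5: without any newline the loop just appends the text
lemma pvALoc_no_newline (n : Nat) (pfx : List Char) :
    ∀ (s : List Char) (i : Nat) (out q : List Char), '\n' ∉ s →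
      pvALoc n pfx s i out q = out ++ s := by
  intro s
  induction s with
  | nil => intro i out q _; simp [pvALoc]
  | cons c tl ih =>
      intro i out q hnl
      have hc : c ≠ '\n' := fun h => hnl (h ▸ List.mem_cons_self)
      have htl : '\n' ∉ tl := fun h => hnl (List.mem_cons_of_mem _ h)
      rw [pvALoc]
      have hout : (if c = '\n' ∧ q = [] then out ++ '\n' :: pfx else out ++ [c]) = out ++ [c] := by
        rw [if_neg]; rintro ⟨h, -⟩; exact hc h
      rw [hout, ih _ _ _ htl]
      simp

-- L6: consuming the newline itself leaves the quote state unchanged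
lemma pvALoc_newline (n : Nat) (pfx : List Char) (rest : List Char) (i : Nat) (out q : List Char)
    (hq : pvQInv q) :
    pvALoc n pfx ('\n' :: rest) i out q
      = pvALoc n pfx rest (i + 1) (out ++ (if q = [] then '\n' :: pfx else ['\n'])) q := by
  rw [pvALoc]
  have hqs : pvQStep n i ('\n' :: rest) q = q := by
    apply pvQStep_newline _ _ _ _ hq
    simp [List.take]
  rw [hqs]
  have hemit : (if ('\n' : Char) = '\n' ∧ q = [] then out ++ '\n' :: pfx else out ++ ['\n'])
      = out ++ (if q = [] then '\n' :: pfx else ['\n']) := by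
    by_cases h : q = [] <;> simp [h]
  rw [hemit]

lemma pvSplitOn_no_newline (s : List Char) (h : '\n' ∉ s) : s.splitOn '\n' = [s] := by
  unfold List.splitOn
  apply List.splitOnP_eq_single
  intro x hx
  simp only [beq_iff_eq]
  intro hxe; exact h (hxe ▸ hx)

lemma pvSplitOn_first (L rest : List Char) (h : '\n' ∉ L) :
    (L ++ '\n' :: rest).splitOn '\n' = L :: rest.splitOn '\n' := by
  unfold List.splitOn
  apply List.splitOnP_first
  · intro x hx
    simp only [beq_iff_eq]
    intro hxe; exact h (hxe ▸ hx)
  · simp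

lemma pvBTogRec_inv :
    ∀ (L : List Char) (q : List Char), pvQInv q → pvQInv (pvBTogRec L q) := by
  intro L
  induction L with
  | nil => intro q hq; exact hq
  | cons c tl ih =>
      intro q hq
      match tl with
      | [] => exact hq
      | [c2] => exact hq
      | c2 :: c3 :: tl' =>
          rw [pvBTogRec]
          exact ih _ (pvStep_inv _ _ hq)

lemma pvFirstLine (s : List Char) (h : '\n' ∈ s) :
    ∃ L rest, '\n' ∉ L ∧ s = L ++ '\n' :: rest := by
  induction s with
  | nil => simp at h
  | cons c tl ih =>
      by_cases hc : c = '\n'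
      · exact ⟨[], tl, by simp, by simp [hc]⟩
      · have htl : '\n' ∈ tl := by
          rcases List.mem_cons.mp h with h1 | h1
          · exact absurd h1.symm hc
          · exact h1
        obtain ⟨L, rest, hL, hsp⟩ := ih htl
        exact ⟨c :: L, rest, by simp [hL, Ne.symm hc], by simp [hsp]⟩

lemma pvSplitOn_ne_nil (s : List Char) : s.splitOn '\n' ≠ [] := by
  unfold List.splitOn
  exact List.splitOnP_ne_nil _ _

-- main lemma: A's loop (position invariant i + |s| = n) produces B's line decomposition
lemma pvMain (n : Nat) (pfx : List Char) :
    ∀ (m : Nat) (s : List Char), s.length ≤ m → ∀ (i : Nat) (out q : List Char),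
      pvQInv q → i + s.length = n →
      pvALoc n pfx s i out q
        = out ++ (s.splitOn '\n').headI ++ pvBRec pfx (s.splitOn '\n') q := by
  intro m
  induction m with
  | zero =>
      intro s hs i out q hq _
      have : s = [] := List.length_eq_zero_iff.mp (Nat.le_zero.mp hs)
      subst this
      simp [pvALoc, pvBRec, List.splitOn]
  | succ m ih =>
      intro s hs i out q hq hpos
      by_cases hnl : '\n' ∈ s
      · obtain ⟨L, rest, hL, rfl⟩ := pvFirstLine s hnl
        have hlen : rest.length ≤ m := by
          simp [List.length_append] at hs; omega
        have hb : i + L.length < n := by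
          simp [List.length_append] at hpos; omega
        rw [pvALoc_append _ _ _ _ _ _ _ hL,
          pvQScan_eq_togRec _ _ _ _ _ hL hq hb]
        have hq1 : pvQInv (pvBTogRec L q) := pvBTogRec_inv _ _ hq
        have hpos' : (i + L.length + 1) + rest.length = n := by
          simp [List.length_append] at hpos; omega
        rw [pvALoc_newline _ _ _ _ _ _ hq1,
          ih _ hlen _ _ _ hq1 hpos',
          pvSplitOn_first _ _ hL]
        obtain ⟨h2, t2, hsp⟩ := List.exists_cons_of_ne_nil (pvSplitOn_ne_nil rest)
        rw [hsp]
        rw [pvBRec, pvBToggle_eq_rec]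
        simp only [List.headI]
        by_cases hqe : pvBTogRec L q = [] <;>
          simp [hqe, List.append_assoc]
      · rw [pvALoc_no_newline _ _ _ _ _ _ hnl, pvSplitOn_no_newline _ hnl]
        simp [pvBRec]

-- B's foldl equals pvBRec
lemma pvBLoop_eq_rec (pfx : List Char) :
    ∀ (lines : List (List Char)) (q : List Char) (parts : List (List Char)),
      (pvBLoop pfx (lines.zip lines.tail) (q, parts)).2.flatten
        = parts.flatten ++ pvBRec pfx lines q := by
  intro lines
  induction lines with
  | nil => intro q parts; simp [pvBLoop, pvBRec]
  | cons L ls ih =>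
      intro q parts
      match ls with
      | [] => simp [pvBLoop, pvBRec]
      | l2 :: ls' =>
          show (pvBLoop pfx ((L, l2) :: ((l2 :: ls').zip (l2 :: ls').tail)) (q, parts)).2.flatten = _
          unfold pvBLoop
          rw [List.foldl_cons]
          have := ih (pvBToggle L q)
            (parts ++ ['\n' :: ((if pvBToggle L q = [] then pfx else []) ++ l2)])
          unfold pvBLoop at this
          rw [this, pvBRec]
          simp

-- ===== VERDICT (by name: the statement is the Claim_ definition above) =====
theorem prefix_code_spec : Claim_equal_prefix_code := by
  intro code prefix_ _
  unfold Spec_prefix_code prefix_code prefix_code_alt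
  rw [pvALoop_eq_loc _ _ _ _ 0 _ _ (by simp)]
  rw [pvMain _ _ code.toList.length _ le_rfl _ _ _ (Or.inl rfl) (by simp)]
  show _ = String.ofList (pvBLoop prefix_.toList
      ((code.toList.splitOn '\n').zip (code.toList.splitOn '\n').tail)
      ([], [prefix_.toList ++ (code.toList.splitOn '\n').headI])).2.flatten
  rw [pvBLoop_eq_rec]
  simp
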